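-- pv_equiv track=rewrite | github.com/PolarState/CFG | cfg/cfg_utils.py | _count_per_production
-- ===== SOURCE A (Python) =====
-- def _count_per_nonterminal(cfg_rules):
--     """Return a dict mapping each nonterminal to its generation count.
--
--     Unlike count_generations, this computes counts for ALL nonterminals
--     in the grammar, not just those reachable from a given start symbol.
--     It also does not handle recursive grammars (no cycle detection).
--     """
--     counts = {}
--
--     def compute(symbol):
--         # Terminals always count as 1.
--         if symbol not in cfg_rules:
--             return 1
--         # Return cached result if we've already computed this nonterminal.
--         if symbol in counts:
--             return counts[symbol]
--
--         # Sum over production rules, product within each rule.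
--         # See count_generations for the explanation of why this works.
--         total = 0
--         for production in cfg_rules[symbol]:
--             prod_count = 1
--             for sym in production:
--                 prod_count *= compute(sym)
--             total += prod_count
--
--         counts[symbol] = total
--         return total
--
--     # Compute for every nonterminal in the grammar.
--     for nt in cfg_rules:
--         compute(nt)
--
--     return counts
--
-- def _count_per_production(cfg_rules):
--     """Return a dict mapping each nonterminal to a list of per-production counts.
--
--     Where _count_per_nonterminal gives a single total per nonterminal,
--     this breaks it down: how many sentences does each individual production
--     rule generate? This is the building block for weighted sampling.
--     """
--     # First get the total count for each nonterminal so we can look up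
--     # child counts without recomputing.
--     nt_counts = _count_per_nonterminal(cfg_rules)
--     prod_counts = {}
--
--     for nt, productions in cfg_rules.items():
--         counts = []
--         for production in productions:
--             # Each production's count is the product of its children's counts.
--             # Terminals aren't in nt_counts, so default to 1.
--             prod_count = 1
--             for sym in production:
--                 prod_count *= nt_counts.get(sym, 1)
--             counts.append(prod_count)
--         prod_counts[nt] = counts
--
--     return prod_counts
-- ===== SOURCE B (Python) =====
-- def _count_per_production(cfg_rules):
--     """Return a dict mapping each nonterminal to a list of per-production counts.
--
--     Iterative (worklist) version: instead of a memoized recursion, repeatedly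
--     resolve every nonterminal whose children are all already resolved
--     (Kahn-style topological passes), then read the per-production counts off
--     the resolved table in one comprehension.  Recursive grammars make the
--     worklist stall; like the original's unbounded recursion, that raises
--     RecursionError.
--     """
--     counts = {}
--
--     def rule_count(production):
--         p = 1
--         for sym in production:
--             p *= counts.get(sym, 1)
--         return p
--
--     pending = list(cfg_rules)
--     while pending:
--         remaining = []
--         for nt in pending:
--             if all(sym in counts or sym not in cfg_rules
--                    for production in cfg_rules[nt] for sym in production):
--                 counts[nt] = sum(rule_count(production)
--                                  for production in cfg_rules[nt])
--             else:
--                 remaining.append(nt)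
--         if len(remaining) == len(pending):
--             raise RecursionError('recursive grammar')
--         pending = remaining
--
--     return {nt: [rule_count(production) for production in productions]
--             for nt, productions in cfg_rules.items()}
-- ===== Notes on version B (the rewrite author's own statement) =====
-- stated objective: alternative
-- what changed: Replaced the memoized two-pass recursion (compute nonterminal totals recursively with a cache, then a second pass over productions) by an iterative Kahn-style worklist that resolves, in repeated passes, every nonterminal whose children are already resolved, then reads the per-production counts off the resolved table; no recursion at all.
import Mathlib
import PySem

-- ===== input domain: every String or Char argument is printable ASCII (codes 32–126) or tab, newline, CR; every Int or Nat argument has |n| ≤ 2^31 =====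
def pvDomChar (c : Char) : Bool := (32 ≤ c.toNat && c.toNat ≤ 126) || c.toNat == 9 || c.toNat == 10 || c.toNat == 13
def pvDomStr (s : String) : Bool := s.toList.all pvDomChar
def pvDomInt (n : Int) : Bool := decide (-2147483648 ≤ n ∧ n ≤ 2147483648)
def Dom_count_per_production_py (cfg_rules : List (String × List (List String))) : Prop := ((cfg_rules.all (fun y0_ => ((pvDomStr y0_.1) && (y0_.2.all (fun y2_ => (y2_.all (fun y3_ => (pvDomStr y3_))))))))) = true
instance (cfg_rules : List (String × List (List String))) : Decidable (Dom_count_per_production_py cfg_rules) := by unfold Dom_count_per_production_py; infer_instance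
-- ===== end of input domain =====

-- B replaces A's memoized two-pass recursion by an iterative Kahn-style worklist (no recursion);
-- objective: alternative algorithm of similar cost.

-- ===== PORT A =====
-- the inner recursive `compute` of _count_per_nonterminal; Python has no fuel, the Nat fuel only
-- makes the recursion structural (cfg_rules.length + 1 provably suffices on the acyclic inputs Pre_ admits)
def pvComputeA (cfg : List (String × List (List String))) :
    Nat → PySem.Dict String Int → String → Int × PySem.Dict String Int
  | fuel, counts, symbol =>
    match (PySem.Dict.ofList cfg).get? symbol with
    | none => (1, counts)                      -- terminals count as 1
    | some prods =>
      match counts.get? symbol with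
      | some v => (v, counts)                  -- cached
      | none =>
        match fuel with
        | 0 => (0, counts)                     -- unreachable under Pre_ (acyclic grammar)
        | fuel' + 1 =>
          let st := prods.foldl (fun (acc : Int × PySem.Dict String Int) production =>
              let inner := production.foldl (fun (acc2 : Int × PySem.Dict String Int) sym =>
                  let r := pvComputeA cfg fuel' acc2.2 sym
                  (acc2.1 * r.1, r.2)) (1, acc.2)
              (acc.1 + inner.1, inner.2)) (0, counts)
          (st.1, st.2.insert symbol st.1)

def count_per_production_py (cfg_rules : List (String × List (List String))) : List (String × List Int) :=
  -- nt_counts = _count_per_nonterminal(cfg_rules)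
  let nt_counts := cfg_rules.foldl
    (fun c p => (pvComputeA cfg_rules (cfg_rules.length + 1) c p.1).2) PySem.Dict.empty
  -- second pass: per-production products of nt_counts.get(sym, 1)
  (cfg_rules.foldl (fun d p =>
      d.insert p.1 (p.2.map (fun production =>
        production.foldl (fun pc sym => pc * nt_counts.getD sym 1) 1)))
    PySem.Dict.empty).items

-- ===== PORT B =====
def pvRuleCountB (counts : PySem.Dict String Int) (production : List String) : Int :=
  production.foldl (fun p sym => p * counts.getD sym 1) 1

def pvReadyB (cfg : List (String × List (List String))) (counts : PySem.Dict String Int)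
    (nt : String) : Bool :=
  ((PySem.Dict.ofList cfg).getD nt []).all fun production =>
    production.all fun sym => counts.contains sym || !(PySem.Dict.ofList cfg).contains sym

-- one `while pending:` loop; the fuel only makes it structural (each iteration strictly shrinks
-- `pending`, so cfg.length + 1 always suffices; Python has no fuel). The stalled-worklist exit
-- (st.2.length = pending.length, where the Python raises RecursionError) returns the counts so
-- far; it is unreachable under Pre_ (acyclic grammars always make progress).
def pvLoopB (cfg : List (String × List (List String))) :
    Nat → PySem.Dict String Int → List String → PySem.Dict String Int
  | _, counts, [] => counts
  | 0, counts, _ => counts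
  | fuel + 1, counts, pending =>
    let st := pending.foldl (fun (acc : PySem.Dict String Int × List String) nt =>
        if pvReadyB cfg acc.1 nt then
          (acc.1.insert nt (((PySem.Dict.ofList cfg).getD nt []).map (pvRuleCountB acc.1)).sum, acc.2)
        else (acc.1, acc.2 ++ [nt])) (counts, [])
    if st.2.length = pending.length then st.1 else pvLoopB cfg fuel st.1 st.2

def count_per_production_py_alt (cfg_rules : List (String × List (List String))) : List (String × List Int) :=
  let counts := pvLoopB cfg_rules (cfg_rules.length + 1) PySem.Dict.empty (cfg_rules.map Prod.fst)
  (cfg_rules.foldl (fun d p => d.insert p.1 (p.2.map (pvRuleCountB counts))) PySem.Dict.empty).items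

-- ===== PRECONDITION & SPEC =====
-- dependency graph of the grammar: edges from a symbol to the nonterminal children of its productions
def pvChildF (cfg : List (String × List (List String))) (s : String) : Finset String :=
  ((((PySem.Dict.ofList cfg).getD s []).flatten).filter
    (fun t => (PySem.Dict.ofList cfg).contains t)).toFinset

def pvNextF (cfg : List (String × List (List String))) (S : Finset String) : Finset String :=
  S ∪ S.biUnion (pvChildF cfg)

-- nonterminals reachable from s in ≥ 1 step (cfg.length closure iterations suffice)
def pvReachF (cfg : List (String × List (List String))) (s : String) : Finset String :=
  (pvNextF cfg)^[cfg.length] (pvChildF cfg s)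

-- Pre_: the grammar (the Python dict the list encodes, duplicate keys overwritten) is acyclic —
-- no nonterminal reaches itself; on cyclic grammars A raises RecursionError (and B's stalled
-- worklist raises RecursionError too).
def Pre_count_per_production_py (cfg_rules : List (String × List (List String))) : Prop :=
  ∀ p ∈ cfg_rules, p.1 ∉ pvReachF cfg_rules p.1
instance (cfg_rules : List (String × List (List String))) : Decidable (Pre_count_per_production_py cfg_rules) := by
  unfold Pre_count_per_production_py; infer_instance

def pvWitness_count_per_production_py : (List (String × List (List String))) :=
  [("S", [["a", "T"], []]), ("T", [["b"], ["c", "c"]])]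

def Spec_count_per_production_py (cfg_rules : List (String × List (List String))) (out : List (String × List Int)) : Prop := out = count_per_production_py_alt cfg_rules
instance (cfg_rules : List (String × List (List String))) (out : List (String × List Int)) : Decidable (Spec_count_per_production_py cfg_rules out) := by unfold Spec_count_per_production_py; infer_instance

-- ===== CLAIM (what is proved, stated in full; the proofs are below) =====
def Claim_equal_count_per_production_py : Prop := ∀ (cfg_rules : List (String × List (List String))), Dom_count_per_production_py cfg_rules → Pre_count_per_production_py cfg_rules → Spec_count_per_production_py cfg_rules (count_per_production_py cfg_rules)


-- ===== LEMMAS AND PROOFS =====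

-- ----- proof-side machinery: a pure fueled count function and a rank from the reachability sets -----

def pvKeysF (cfg : List (String × List (List String))) : Finset String :=
  (cfg.map Prod.fst).toFinset

def pvCnt (cfg : List (String × List (List String))) : Nat → String → Int
  | f, s =>
    match (PySem.Dict.ofList cfg).get? s with
    | none => 1
    | some prods =>
      match f with
      | 0 => 0
      | f' + 1 => (prods.map (fun production => (production.map (pvCnt cfg f')).prod)).sum

def pvRank (cfg : List (String × List (List String))) (s : String) : Nat :=
  (pvReachF cfg s).card

def pvCval (cfg : List (String × List (List String))) (s : String) : Int :=
  pvCnt cfg (pvRank cfg s + 1) s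

def pvGood (cfg : List (String × List (List String))) (c : PySem.Dict String Int) : Prop :=
  ∀ k v, c.get? k = some v → (PySem.Dict.ofList cfg).contains k = true ∧ v = pvCval cfg k

-- ----- basic dictionary facts -----

lemma pv_contains_iff (cfg : List (String × List (List String))) (t : String) :
    (PySem.Dict.ofList cfg).contains t = true ↔ t ∈ cfg.map Prod.fst := by
  rw [PySem.Dict.contains_iff_mem_keys]
  rw [show (PySem.Dict.ofList cfg) = cfg.foldl (fun d p => d.insert p.1 p.2) PySem.Dict.empty from rfl]
  rw [PySem.Dict.keys_foldl_insert_key cfg Prod.fst (fun _ p => p.2) PySem.Dict.empty]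
  rw [show (PySem.Dict.empty : PySem.Dict String (List (List String))).keys = ([] : List String) from rfl]
  rw [show (PySem.Set.update [] (cfg.map Prod.fst)) = PySem.Set.ofList (cfg.map Prod.fst) from
    PySem.Set.update_empty _]
  exact PySem.Set.mem_ofList _ _

lemma pv_get?_none_of_not_contains (cfg : List (String × List (List String))) (t : String)
    (h : ¬ (PySem.Dict.ofList cfg).contains t = true) : (PySem.Dict.ofList cfg).get? t = none := by
  rw [PySem.Dict.contains_eq_isSome_get?] at h
  exact Option.not_isSome_iff_eq_none.mp (by simpa using h)

lemma pv_contains_of_get?_some (cfg : List (String × List (List String))) (t : String)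
    (prods : List (List String)) (h : (PySem.Dict.ofList cfg).get? t = some prods) :
    (PySem.Dict.ofList cfg).contains t = true := by
  rw [PySem.Dict.contains_eq_isSome_get?, h]
  rfl

lemma pv_getD_of_get?_some (cfg : List (String × List (List String))) (t : String)
    (prods : List (List String)) (h : (PySem.Dict.ofList cfg).get? t = some prods) :
    (PySem.Dict.ofList cfg).getD t [] = prods := by
  simp [PySem.Dict.getD_eq_get?_getD, h]

-- ----- graph lemmas -----

lemma pv_child_mem (cfg : List (String × List (List String))) (s : String)
    (prods : List (List String)) (production : List String) (sym : String)
    (h : (PySem.Dict.ofList cfg).get? s = some prods) (hp : production ∈ prods)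
    (hs : sym ∈ production) (hc : (PySem.Dict.ofList cfg).contains sym = true) :
    sym ∈ pvChildF cfg s := by
  rw [pvChildF, pv_getD_of_get?_some cfg s prods h]
  simp only [List.mem_toFinset, List.mem_filter, List.mem_flatten]
  exact ⟨⟨production, hp, hs⟩, by simp [hc]⟩

lemma pv_child_key (cfg : List (String × List (List String))) (s t : String)
    (ht : t ∈ pvChildF cfg s) : (PySem.Dict.ofList cfg).contains t = true := by
  rw [pvChildF] at ht
  simp only [List.mem_toFinset, List.mem_filter] at ht
  simpa using ht.2

lemma pv_child_subset_keysF (cfg : List (String × List (List String))) (s : String) :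
    pvChildF cfg s ⊆ pvKeysF cfg := by
  intro t ht
  rw [pvKeysF, List.mem_toFinset]
  exact (pv_contains_iff cfg t).mp (pv_child_key cfg s t ht)

lemma pv_next_grow (cfg : List (String × List (List String))) (S : Finset String) :
    S ⊆ pvNextF cfg S := Finset.subset_union_left

lemma pv_next_mono (cfg : List (String × List (List String))) {S T : Finset String}
    (h : S ⊆ T) : pvNextF cfg S ⊆ pvNextF cfg T := by
  rw [pvNextF, pvNextF]
  exact Finset.union_subset_union h (Finset.biUnion_subset_biUnion_of_subset_left _ h)

lemma pv_next_inU (cfg : List (String × List (List String))) {S : Finset String}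
    (h : S ⊆ pvKeysF cfg) : pvNextF cfg S ⊆ pvKeysF cfg := by
  rw [pvNextF]
  refine Finset.union_subset h (Finset.biUnion_subset.mpr fun k _ => ?_)
  exact pv_child_subset_keysF cfg k

lemma pv_fix {α : Type} [DecidableEq α] (f : Finset α → Finset α) (U : Finset α)
    (hgrow : ∀ S, S ⊆ f S) (hU : ∀ S, S ⊆ U → f S ⊆ U) (S : Finset α) (hS : S ⊆ U)
    (n : Nat) (hn : U.card ≤ n) : f (f^[n] S) = f^[n] S := by
  have hin : ∀ i, f^[i] S ⊆ U := by
    intro i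
    induction i with
    | zero => exact hS
    | succ j ih => rw [Function.iterate_succ_apply']; exact hU _ ih
  have key : ∀ i, f (f^[i] S) = f^[i] S ∨ i ≤ (f^[i] S).card := by
    intro i
    induction i with
    | zero => right; omega
    | succ j ih =>
      by_cases hfx : f (f^[j] S) = f^[j] S
      · left; rw [Function.iterate_succ_apply', hfx]; exact hfx
      · rcases ih with hfix | hcard
        · exact absurd hfix hfx
        · right
          rw [Function.iterate_succ_apply']
          have hss : f^[j] S ⊂ f (f^[j] S) := (hgrow _).ssubset_of_ne (fun e => hfx e.symm)
          have := Finset.card_lt_card hss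
          omega
  rcases key n with hfix | hcard
  · exact hfix
  · have h1 : (f^[n] S).card ≤ U.card := Finset.card_le_card (hin n)
    have hEq : f^[n] S = U := Finset.eq_of_subset_of_card_le (hin n) (by omega)
    rw [hEq]
    exact subset_antisymm (hU U subset_rfl) (hgrow U)

lemma pv_iter_grow {α : Type} (f : Finset α → Finset α) (hgrow : ∀ S, S ⊆ f S)
    (S : Finset α) (n : Nat) : S ⊆ f^[n] S := by
  induction n with
  | zero => simp
  | succ m ih =>
    rw [Function.iterate_succ_apply']
    exact ih.trans (hgrow _)

lemma pv_iter_subset_closed (cfg : List (String × List (List String))) {S C : Finset String}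
    (n : Nat) (hS : S ⊆ C) (hC : pvNextF cfg C = C) : (pvNextF cfg)^[n] S ⊆ C := by
  induction n with
  | zero => simpa using hS
  | succ m ih =>
    rw [Function.iterate_succ_apply']
    calc pvNextF cfg ((pvNextF cfg)^[m] S) ⊆ pvNextF cfg C := pv_next_mono cfg ih
    _ = C := hC

lemma pv_reach_fix (cfg : List (String × List (List String))) (s : String) :
    pvNextF cfg (pvReachF cfg s) = pvReachF cfg s := by
  rw [pvReachF]
  refine pv_fix (pvNextF cfg) (pvKeysF cfg) (pv_next_grow cfg) (fun S h => pv_next_inU cfg h)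
    (pvChildF cfg s) (pv_child_subset_keysF cfg s) cfg.length ?_
  calc (pvKeysF cfg).card ≤ (cfg.map Prod.fst).length := List.toFinset_card_le _
  _ = cfg.length := List.length_map ..

lemma pv_reach_subset_keysF (cfg : List (String × List (List String))) (s : String) :
    pvReachF cfg s ⊆ pvKeysF cfg := by
  rw [pvReachF]
  intro t ht
  have : ∀ i, (pvNextF cfg)^[i] (pvChildF cfg s) ⊆ pvKeysF cfg := by
    intro i
    induction i with
    | zero => exact pv_child_subset_keysF cfg s
    | succ m ih => rw [Function.iterate_succ_apply']; exact pv_next_inU cfg ih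
  exact this cfg.length ht

lemma pv_rank_le (cfg : List (String × List (List String))) (s : String) :
    pvRank cfg s ≤ cfg.length := by
  rw [pvRank]
  calc (pvReachF cfg s).card ≤ (pvKeysF cfg).card := Finset.card_le_card (pv_reach_subset_keysF cfg s)
  _ ≤ (cfg.map Prod.fst).length := List.toFinset_card_le _
  _ = cfg.length := List.length_map ..

lemma pv_child_subset_reach (cfg : List (String × List (List String))) (s : String) :
    pvChildF cfg s ⊆ pvReachF cfg s :=
  pv_iter_grow (pvNextF cfg) (pv_next_grow cfg) _ _

lemma pv_reach_closed (cfg : List (String × List (List String))) (s t : String)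
    (ht : t ∈ pvReachF cfg s) : pvChildF cfg t ⊆ pvReachF cfg s := by
  intro x hx
  have : x ∈ pvNextF cfg (pvReachF cfg s) := by
    rw [pvNextF]
    exact Finset.mem_union_right _ (Finset.mem_biUnion.mpr ⟨t, ht, hx⟩)
  rwa [pv_reach_fix cfg s] at this

lemma pv_reach_child (cfg : List (String × List (List String))) (s t : String)
    (ht : t ∈ pvChildF cfg s) : pvReachF cfg t ⊆ pvReachF cfg s := by
  rw [pvReachF]
  exact pv_iter_subset_closed cfg _
    (pv_reach_closed cfg s t (pv_child_subset_reach cfg s ht)) (pv_reach_fix cfg s)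

lemma pv_rank_lt (cfg : List (String × List (List String)))
    (hpre : Pre_count_per_production_py cfg) (s t : String)
    (ht : t ∈ pvChildF cfg s) : pvRank cfg t < pvRank cfg s := by
  have hkey : (PySem.Dict.ofList cfg).contains t = true := pv_child_key cfg s t ht
  have hmem : t ∈ cfg.map Prod.fst := (pv_contains_iff cfg t).mp hkey
  obtain ⟨p, hp, hpt⟩ := List.mem_map.mp hmem
  have hnotin : t ∉ pvReachF cfg t := hpt ▸ hpre p hp
  have hsub : pvReachF cfg t ⊆ pvReachF cfg s := pv_reach_child cfg s t ht
  have hmem' : t ∈ pvReachF cfg s := pv_child_subset_reach cfg s ht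
  rw [pvRank, pvRank]
  exact Finset.card_lt_card ((Finset.ssubset_iff_of_subset hsub).mpr ⟨t, hmem', hnotin⟩)

-- ----- the pure count function -----

lemma pv_cnt_term (cfg : List (String × List (List String))) (f : Nat) (s : String)
    (h : (PySem.Dict.ofList cfg).get? s = none) : pvCnt cfg f s = 1 := by
  cases f <;> simp [pvCnt, h]

lemma pv_cnt_key (cfg : List (String × List (List String))) (f : Nat) (s : String)
    (prods : List (List String)) (h : (PySem.Dict.ofList cfg).get? s = some prods) :
    pvCnt cfg (f + 1) s
      = (prods.map (fun production => (production.map (pvCnt cfg f)).prod)).sum := by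
  conv_lhs => rw [pvCnt]
  rw [h]

lemma pv_cnt_stable (cfg : List (String × List (List String)))
    (hpre : Pre_count_per_production_py cfg) :
    ∀ (f1 : Nat) (s : String) (f2 : Nat), pvRank cfg s < f1 → pvRank cfg s < f2 →
      pvCnt cfg f1 s = pvCnt cfg f2 s := by
  intro f1
  induction f1 with
  | zero => intro s f2 h1 h2; omega
  | succ g1 ih =>
    intro s f2 h1 h2
    cases hget : (PySem.Dict.ofList cfg).get? s with
    | none => rw [pv_cnt_term cfg _ s hget, pv_cnt_term cfg _ s hget]
    | some prods =>
      obtain ⟨g2, rfl⟩ : ∃ g2, f2 = g2 + 1 := ⟨f2 - 1, by omega⟩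
      rw [pv_cnt_key cfg g1 s prods hget, pv_cnt_key cfg g2 s prods hget]
      congr 1
      refine List.map_congr_left fun production hp => ?_
      congr 1
      refine List.map_congr_left fun sym hs => ?_
      by_cases hk : (PySem.Dict.ofList cfg).contains sym = true
      · have hch : sym ∈ pvChildF cfg s := pv_child_mem cfg s prods production sym hget hp hs hk
        have hlt := pv_rank_lt cfg hpre s sym hch
        exact ih sym g2 (by omega) (by omega)
      · have hnone := pv_get?_none_of_not_contains cfg sym hk
        rw [pv_cnt_term cfg _ sym hnone, pv_cnt_term cfg _ sym hnone]

lemma pv_cval_term (cfg : List (String × List (List String))) (s : String)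
    (h : (PySem.Dict.ofList cfg).get? s = none) : pvCval cfg s = 1 :=
  pv_cnt_term cfg _ s h

lemma pv_cval_key (cfg : List (String × List (List String)))
    (hpre : Pre_count_per_production_py cfg) (s : String) (prods : List (List String))
    (h : (PySem.Dict.ofList cfg).get? s = some prods) :
    pvCval cfg s = (prods.map (fun production => (production.map (pvCval cfg)).prod)).sum := by
  rw [pvCval, pv_cnt_key cfg _ s prods h]
  congr 1
  refine List.map_congr_left fun production hp => ?_
  congr 1
  refine List.map_congr_left fun sym hs => ?_
  by_cases hk : (PySem.Dict.ofList cfg).contains sym = true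
  · have hch : sym ∈ pvChildF cfg s := pv_child_mem cfg s prods production sym h hp hs hk
    have hlt := pv_rank_lt cfg hpre s sym hch
    exact pv_cnt_stable cfg hpre (pvRank cfg s) sym (pvRank cfg sym + 1) hlt (by omega)
  · have hnone := pv_get?_none_of_not_contains cfg sym hk
    rw [pv_cnt_term cfg _ sym hnone, pv_cval_term cfg sym hnone]

-- ----- reading counts dictionaries -----

lemma pv_getD_cval (cfg : List (String × List (List String))) (c : PySem.Dict String Int)
    (sym : String) (hG : pvGood cfg c)
    (h : c.contains sym = true ∨ (PySem.Dict.ofList cfg).contains sym = false) :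
    c.getD sym 1 = pvCval cfg sym := by
  rcases h with hc | ht
  · rw [PySem.Dict.contains_eq_isSome_get?] at hc
    obtain ⟨v, hv⟩ := Option.isSome_iff_exists.mp hc
    rw [PySem.Dict.getD_eq_get?_getD, hv, (hG sym v hv).2]
    rfl
  · cases hcs : c.get? sym with
    | none =>
      rw [PySem.Dict.getD_eq_get?_getD, hcs]
      rw [pv_cval_term cfg sym (pv_get?_none_of_not_contains cfg sym (by simp [ht]))]
      rfl
    | some v =>
      have := (hG sym v hcs).1
      rw [this] at ht
      exact absurd ht (by simp)

lemma pv_all_getD (cfg : List (String × List (List String))) (c : PySem.Dict String Int)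
    (hG : pvGood cfg c) (hall : ∀ p ∈ cfg, c.contains p.1 = true) :
    ∀ sym, c.getD sym 1 = pvCval cfg sym := by
  intro sym
  by_cases hk : (PySem.Dict.ofList cfg).contains sym = true
  · obtain ⟨p, hp, hps⟩ := List.mem_map.mp ((pv_contains_iff cfg sym).mp hk)
    exact pv_getD_cval cfg c sym hG (Or.inl (hps ▸ hall p hp))
  · exact pv_getD_cval cfg c sym hG (Or.inr (Bool.not_eq_true _ ▸ eq_false_of_ne_true hk))

lemma pv_prod_foldl (cfg : List (String × List (List String))) (production : List String) :
    production.foldl (fun pc sym => pc * pvCval cfg sym) 1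
      = (production.map (pvCval cfg)).prod := by
  rw [List.prod_eq_foldl, List.foldl_map]

-- ----- port A: the memoized recursion computes pvCval -----

lemma pv_good_insert (cfg : List (String × List (List String))) (c : PySem.Dict String Int)
    (s : String) (hG : pvGood cfg c) (hk : (PySem.Dict.ofList cfg).contains s = true) :
    pvGood cfg (c.insert s (pvCval cfg s)) := by
  intro k v h
  rw [PySem.Dict.get?_insert] at h
  split_ifs at h with he
  · injection h with h'
    subst he
    exact ⟨hk, h'.symm⟩
  · exact hG k v h

def pvAOK (cfg : List (String × List (List String))) (f : Nat) : Prop :=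
  ∀ (c : PySem.Dict String Int) (s : String), pvGood cfg c →
    ((PySem.Dict.ofList cfg).contains s = true → pvRank cfg s < f) →
    (pvComputeA cfg f c s).1 = pvCval cfg s ∧ pvGood cfg (pvComputeA cfg f c s).2 ∧
    (∀ k, c.contains k = true → (pvComputeA cfg f c s).2.contains k = true) ∧
    ((PySem.Dict.ofList cfg).contains s = true → (pvComputeA cfg f c s).2.contains s = true)

lemma pv_innerA (cfg : List (String × List (List String))) (f : Nat) (HIH : pvAOK cfg f) :
    ∀ (production : List String) (p : Int) (c : PySem.Dict String Int), pvGood cfg c →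
      (∀ sym ∈ production, (PySem.Dict.ofList cfg).contains sym = true → pvRank cfg sym < f) →
      (production.foldl (fun (acc2 : Int × PySem.Dict String Int) sym =>
          (acc2.1 * (pvComputeA cfg f acc2.2 sym).1, (pvComputeA cfg f acc2.2 sym).2)) (p, c)).1
        = p * (production.map (pvCval cfg)).prod ∧
      pvGood cfg (production.foldl (fun (acc2 : Int × PySem.Dict String Int) sym =>
          (acc2.1 * (pvComputeA cfg f acc2.2 sym).1, (pvComputeA cfg f acc2.2 sym).2)) (p, c)).2 ∧
      (∀ k, c.contains k = true →
        (production.foldl (fun (acc2 : Int × PySem.Dict String Int) sym =>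
          (acc2.1 * (pvComputeA cfg f acc2.2 sym).1, (pvComputeA cfg f acc2.2 sym).2)) (p, c)).2.contains k = true) := by
  intro production
  induction production with
  | nil =>
    intro p c hG _
    refine ⟨by simp, hG, fun k hk => hk⟩
  | cons sym rest ih =>
    intro p c hG hb
    obtain ⟨h1, h2, h3, _⟩ := HIH c sym hG (hb sym List.mem_cons_self)
    obtain ⟨ih1, ih2, ih3⟩ := ih (p * (pvComputeA cfg f c sym).1) (pvComputeA cfg f c sym).2 h2
      (fun sym' hs' => hb sym' (List.mem_cons_of_mem _ hs'))
    refine ⟨?_, ih2, fun k hk => ih3 k (h3 k hk)⟩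
    rw [List.foldl_cons] at *
    rw [ih1, h1, List.map_cons, List.prod_cons]
    ring

lemma pv_outerA (cfg : List (String × List (List String))) (f : Nat) (HIH : pvAOK cfg f) :
    ∀ (prods : List (List String)) (t : Int) (c : PySem.Dict String Int), pvGood cfg c →
      (∀ production ∈ prods, ∀ sym ∈ production,
        (PySem.Dict.ofList cfg).contains sym = true → pvRank cfg sym < f) →
      (prods.foldl (fun (acc : Int × PySem.Dict String Int) production =>
          let inner := production.foldl (fun (acc2 : Int × PySem.Dict String Int) sym =>
            (acc2.1 * (pvComputeA cfg f acc2.2 sym).1, (pvComputeA cfg f acc2.2 sym).2)) (1, acc.2)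
          (acc.1 + inner.1, inner.2)) (t, c)).1
        = t + (prods.map (fun production => (production.map (pvCval cfg)).prod)).sum ∧
      pvGood cfg (prods.foldl (fun (acc : Int × PySem.Dict String Int) production =>
          let inner := production.foldl (fun (acc2 : Int × PySem.Dict String Int) sym =>
            (acc2.1 * (pvComputeA cfg f acc2.2 sym).1, (pvComputeA cfg f acc2.2 sym).2)) (1, acc.2)
          (acc.1 + inner.1, inner.2)) (t, c)).2 ∧
      (∀ k, c.contains k = true →
        (prods.foldl (fun (acc : Int × PySem.Dict String Int) production =>
          let inner := production.foldl (fun (acc2 : Int × PySem.Dict String Int) sym =>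
            (acc2.1 * (pvComputeA cfg f acc2.2 sym).1, (pvComputeA cfg f acc2.2 sym).2)) (1, acc.2)
          (acc.1 + inner.1, inner.2)) (t, c)).2.contains k = true) := by
  intro prods
  induction prods with
  | nil =>
    intro t c hG _
    refine ⟨by simp, hG, fun k hk => hk⟩
  | cons production rest ih =>
    intro t c hG hb
    obtain ⟨h1, h2, h3⟩ := pv_innerA cfg f HIH production 1 c hG
      (fun sym hs => hb production List.mem_cons_self sym hs)
    set inner := production.foldl (fun (acc2 : Int × PySem.Dict String Int) sym =>
      (acc2.1 * (pvComputeA cfg f acc2.2 sym).1, (pvComputeA cfg f acc2.2 sym).2)) (1, c) with hinner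
    obtain ⟨ih1, ih2, ih3⟩ := ih (t + inner.1) inner.2 h2
      (fun production' hp' => hb production' (List.mem_cons_of_mem _ hp'))
    refine ⟨?_, ?_, fun k hk => ?_⟩
    · rw [List.foldl_cons] at *
      simp only [← hinner]
      rw [ih1, h1, List.map_cons, List.sum_cons]
      ring
    · rw [List.foldl_cons]
      simpa only [← hinner] using ih2
    · rw [List.foldl_cons]
      simpa only [← hinner] using ih3 k (h3 k hk)

lemma pv_computeA_main (cfg : List (String × List (List String)))
    (hpre : Pre_count_per_production_py cfg) : ∀ f : Nat, pvAOK cfg f := by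
  intro f
  induction f with
  | zero =>
    intro c s hG hrank
    rw [pvComputeA]
    cases hget : (PySem.Dict.ofList cfg).get? s with
    | none =>
      exact ⟨(pv_cval_term cfg s hget).symm, hG, fun k hk => hk,
        fun hk => absurd hget (by rw [PySem.Dict.contains_eq_isSome_get?] at hk; intro h; rw [h] at hk; exact absurd hk (by simp))⟩
    | some prods =>
      have hkey := pv_contains_of_get?_some cfg s prods hget
      cases hcache : c.get? s with
      | some v =>
        exact ⟨(hG s v hcache).2, hG, fun k hk => hk, fun _ =>
          by rw [PySem.Dict.contains_eq_isSome_get?, hcache]; rfl⟩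
      | none => exact absurd (hrank hkey) (by omega)
  | succ f' IH =>
    intro c s hG hrank
    rw [pvComputeA]
    cases hget : (PySem.Dict.ofList cfg).get? s with
    | none =>
      exact ⟨(pv_cval_term cfg s hget).symm, hG, fun k hk => hk,
        fun hk => absurd hget (by rw [PySem.Dict.contains_eq_isSome_get?] at hk; intro h; rw [h] at hk; exact absurd hk (by simp))⟩
    | some prods =>
      have hkey := pv_contains_of_get?_some cfg s prods hget
      cases hcache : c.get? s with
      | some v =>
        exact ⟨(hG s v hcache).2, hG, fun k hk => hk, fun _ =>
          by rw [PySem.Dict.contains_eq_isSome_get?, hcache]; rfl⟩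
      | none =>
        have hbound : ∀ production ∈ prods, ∀ sym ∈ production,
            (PySem.Dict.ofList cfg).contains sym = true → pvRank cfg sym < f' := by
          intro production hp sym hs hk
          have hch := pv_child_mem cfg s prods production sym hget hp hs hk
          have := pv_rank_lt cfg hpre s sym hch
          have := hrank hkey
          omega
        obtain ⟨o1, o2, o3⟩ := pv_outerA cfg f' IH prods 0 c hG hbound
        simp only []
        set st := prods.foldl (fun (acc : Int × PySem.Dict String Int) production =>
          let inner := production.foldl (fun (acc2 : Int × PySem.Dict String Int) sym =>
            (acc2.1 * (pvComputeA cfg f' acc2.2 sym).1, (pvComputeA cfg f' acc2.2 sym).2)) (1, acc.2)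
          (acc.1 + inner.1, inner.2)) (0, c) with hst
        have hval : st.1 = pvCval cfg s := by
          rw [o1, pv_cval_key cfg hpre s prods hget]
          ring
        refine ⟨hval, ?_, fun k hk => ?_, fun _ => ?_⟩
        · rw [hval]
          exact pv_good_insert cfg st.2 s o2 hkey
        · rw [PySem.Dict.contains_insert]
          simp [o3 k hk]
        · rw [PySem.Dict.contains_insert]
          simp

lemma pv_phase1 (cfg : List (String × List (List String)))
    (hpre : Pre_count_per_production_py cfg) :
    ∀ (l : List (String × List (List String))) (c : PySem.Dict String Int),
      pvGood cfg c → (∀ q ∈ l, q ∈ cfg) →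
      pvGood cfg (l.foldl (fun c p => (pvComputeA cfg (cfg.length + 1) c p.1).2) c) ∧
      (∀ k, c.contains k = true →
        (l.foldl (fun c p => (pvComputeA cfg (cfg.length + 1) c p.1).2) c).contains k = true) ∧
      (∀ p ∈ l, (l.foldl (fun c p => (pvComputeA cfg (cfg.length + 1) c p.1).2) c).contains p.1 = true) := by
  intro l
  induction l with
  | nil => exact fun c hG _ => ⟨hG, fun k hk => hk, by simp⟩
  | cons p l' ih =>
    intro c hG hsub
    have hpkey : (PySem.Dict.ofList cfg).contains p.1 = true :=
      (pv_contains_iff cfg p.1).mpr (List.mem_map.mpr ⟨p, hsub p List.mem_cons_self, rfl⟩)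
    have hrk : (PySem.Dict.ofList cfg).contains p.1 = true → pvRank cfg p.1 < cfg.length + 1 :=
      fun _ => Nat.lt_succ_of_le (pv_rank_le cfg p.1)
    obtain ⟨_, m2, m3, m4⟩ := pv_computeA_main cfg hpre (cfg.length + 1) c p.1 hG hrk
    obtain ⟨i1, i2, i3⟩ := ih (pvComputeA cfg (cfg.length + 1) c p.1).2 m2
      (fun q hq => hsub q (List.mem_cons_of_mem _ hq))
    refine ⟨by simpa using i1, fun k hk => by simpa using i2 k (m3 k hk), ?_⟩
    intro q hq
    rcases List.mem_cons.mp hq with rfl | hq'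
    · simpa using i2 q.1 (m4 hpkey)
    · simpa using i3 q hq'

-- ----- port B: the worklist computes pvCval -----

lemma pv_ready_total (cfg : List (String × List (List String)))
    (hpre : Pre_count_per_production_py cfg) (c : PySem.Dict String Int) (nt : String)
    (prods : List (List String)) (hG : pvGood cfg c)
    (hk : (PySem.Dict.ofList cfg).get? nt = some prods) (hr : pvReadyB cfg c nt = true) :
    (((PySem.Dict.ofList cfg).getD nt []).map (pvRuleCountB c)).sum = pvCval cfg nt := by
  rw [pv_getD_of_get?_some cfg nt prods hk]
  rw [pvReadyB, pv_getD_of_get?_some cfg nt prods hk, List.all_eq_true] at hr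
  rw [pv_cval_key cfg hpre nt prods hk]
  congr 1
  refine List.map_congr_left fun production hp => ?_
  have hr' := hr production hp
  rw [List.all_eq_true] at hr'
  rw [pvRuleCountB]
  rw [PySem.List.foldl_congr_mem production _ (fun pc sym => pc * pvCval cfg sym) 1 ?_]
  · exact pv_prod_foldl cfg production
  · intro acc sym hs
    congr 1
    refine pv_getD_cval cfg c sym hG ?_
    rcases Bool.or_eq_true .. |>.mp (hr' sym hs) with hc | ht
    · exact Or.inl hc
    · exact Or.inr (by simpa using ht)

lemma pv_roundB (cfg : List (String × List (List String)))
    (hpre : Pre_count_per_production_py cfg) :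
    ∀ (l : List String) (c : PySem.Dict String Int) (rem : List String), pvGood cfg c →
      (∀ nt ∈ l, (PySem.Dict.ofList cfg).contains nt = true) →
      (pvGood cfg ((l.foldl (fun (acc : PySem.Dict String Int × List String) nt =>
          if pvReadyB cfg acc.1 nt then
            (acc.1.insert nt (((PySem.Dict.ofList cfg).getD nt []).map (pvRuleCountB acc.1)).sum, acc.2)
          else (acc.1, acc.2 ++ [nt])) (c, rem)).1) ∧
      (∀ k, c.contains k = true → ((l.foldl (fun (acc : PySem.Dict String Int × List String) nt =>
          if pvReadyB cfg acc.1 nt then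
            (acc.1.insert nt (((PySem.Dict.ofList cfg).getD nt []).map (pvRuleCountB acc.1)).sum, acc.2)
          else (acc.1, acc.2 ++ [nt])) (c, rem)).1).contains k = true) ∧
      (∀ x ∈ (l.foldl (fun (acc : PySem.Dict String Int × List String) nt =>
          if pvReadyB cfg acc.1 nt then
            (acc.1.insert nt (((PySem.Dict.ofList cfg).getD nt []).map (pvRuleCountB acc.1)).sum, acc.2)
          else (acc.1, acc.2 ++ [nt])) (c, rem)).2, x ∈ rem ∨ x ∈ l) ∧
      (∀ nt ∈ l, ((l.foldl (fun (acc : PySem.Dict String Int × List String) nt =>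
          if pvReadyB cfg acc.1 nt then
            (acc.1.insert nt (((PySem.Dict.ofList cfg).getD nt []).map (pvRuleCountB acc.1)).sum, acc.2)
          else (acc.1, acc.2 ++ [nt])) (c, rem)).1).contains nt = true ∨ nt ∈ (l.foldl (fun (acc : PySem.Dict String Int × List String) nt =>
          if pvReadyB cfg acc.1 nt then
            (acc.1.insert nt (((PySem.Dict.ofList cfg).getD nt []).map (pvRuleCountB acc.1)).sum, acc.2)
          else (acc.1, acc.2 ++ [nt])) (c, rem)).2) ∧
      ((l.foldl (fun (acc : PySem.Dict String Int × List String) nt =>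
          if pvReadyB cfg acc.1 nt then
            (acc.1.insert nt (((PySem.Dict.ofList cfg).getD nt []).map (pvRuleCountB acc.1)).sum, acc.2)
          else (acc.1, acc.2 ++ [nt])) (c, rem)).2.length ≤ rem.length + l.length) ∧
      ((∃ nt ∈ l, pvReadyB cfg c nt = true) → (l.foldl (fun (acc : PySem.Dict String Int × List String) nt =>
          if pvReadyB cfg acc.1 nt then
            (acc.1.insert nt (((PySem.Dict.ofList cfg).getD nt []).map (pvRuleCountB acc.1)).sum, acc.2)
          else (acc.1, acc.2 ++ [nt])) (c, rem)).2.length < rem.length + l.length) ∧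
      (∀ x ∈ rem, x ∈ (l.foldl (fun (acc : PySem.Dict String Int × List String) nt =>
          if pvReadyB cfg acc.1 nt then
            (acc.1.insert nt (((PySem.Dict.ofList cfg).getD nt []).map (pvRuleCountB acc.1)).sum, acc.2)
          else (acc.1, acc.2 ++ [nt])) (c, rem)).2)) := by
  intro l
  induction l with
  | nil =>
    intro c rem hG _
    exact ⟨hG, fun k hk => hk, fun x hx => Or.inl hx, by simp, by simp, by simp,
      fun x hx => hx⟩
  | cons nt l' ih =>
    intro c rem hG hkeys
    have hknt : (PySem.Dict.ofList cfg).contains nt = true := hkeys nt List.mem_cons_self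
    obtain ⟨prods, hprods⟩ : ∃ prods, (PySem.Dict.ofList cfg).get? nt = some prods := by
      rw [PySem.Dict.contains_eq_isSome_get?] at hknt
      exact Option.isSome_iff_exists.mp hknt
    simp only [List.foldl_cons]
    by_cases hready : pvReadyB cfg c nt = true
    · rw [if_pos hready]
      have hS : (((PySem.Dict.ofList cfg).getD nt []).map (pvRuleCountB c)).sum = pvCval cfg nt :=
        pv_ready_total cfg hpre c nt prods hG hprods hready
      have hG' : pvGood cfg (c.insert nt (((PySem.Dict.ofList cfg).getD nt []).map (pvRuleCountB c)).sum) := by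
        rw [hS]
        exact pv_good_insert cfg c nt hG hknt
      obtain ⟨i1, i2, i3, i4, i5, _, i7⟩ := ih _ rem hG'
        (fun nt' h => hkeys nt' (List.mem_cons_of_mem _ h))
      have hmono : ∀ k, c.contains k = true →
          (c.insert nt (((PySem.Dict.ofList cfg).getD nt []).map (pvRuleCountB c)).sum).contains k = true := by
        intro k hk
        rw [PySem.Dict.contains_insert]
        simp [hk]
      refine ⟨i1, fun k hk => i2 k (hmono k hk), fun x hx => (i3 x hx).imp id (List.mem_cons_of_mem _),
        ?_, by simp only [List.length_cons]; omega, fun _ => by simp only [List.length_cons]; omega, i7⟩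
      intro nt' hnt'
      rcases List.mem_cons.mp hnt' with rfl | h'
      · exact Or.inl (i2 nt' (by rw [PySem.Dict.contains_insert]; simp))
      · exact (i4 nt' h').imp id id
    · rw [if_neg hready]
      obtain ⟨i1, i2, i3, i4, i5, i6, i7⟩ := ih c (rem ++ [nt]) hG
        (fun nt' h => hkeys nt' (List.mem_cons_of_mem _ h))
      refine ⟨i1, i2, ?_, ?_, by simp at i5 ⊢; omega, ?_, fun x hx => i7 x (by simp [hx])⟩
      · intro x hx
        rcases i3 x hx with hr | hl
        · rcases List.mem_append.mp hr with h | h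
          · exact Or.inl h
          · exact Or.inr (List.mem_cons.mpr (Or.inl (by simpa using h)))
        · exact Or.inr (List.mem_cons_of_mem _ hl)
      · intro nt' hnt'
        rcases List.mem_cons.mp hnt' with rfl | h'
        · exact Or.inr (i7 nt' (by simp))
        · exact (i4 nt' h').imp id id
      · rintro ⟨nt', hnt', hrdy⟩
        rcases List.mem_cons.mp hnt' with rfl | h'
        · exact absurd hrdy hready
        · have := i6 ⟨nt', h', hrdy⟩
          simp at this ⊢
          omega

lemma pv_exists_min (l : List String) (f : String → Nat) (h : l ≠ []) :
    ∃ a ∈ l, ∀ b ∈ l, f a ≤ f b := by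
  induction l with
  | nil => simp at h
  | cons x t ih =>
    rcases eq_or_ne t [] with rfl | ht
    · exact ⟨x, by simp⟩
    · obtain ⟨a, ha, hmin⟩ := ih ht
      rcases le_total (f x) (f a) with hle | hle
      · exact ⟨x, List.mem_cons_self, by
          intro b hb; rcases List.mem_cons.mp hb with rfl | hb
          · rfl
          · exact hle.trans (hmin b hb)⟩
      · exact ⟨a, List.mem_cons_of_mem _ ha, by
          intro b hb; rcases List.mem_cons.mp hb with rfl | hb
          · exact hle
          · exact hmin b hb⟩

lemma pv_progress (cfg : List (String × List (List String)))
    (hpre : Pre_count_per_production_py cfg) (pending : List String)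
    (c : PySem.Dict String Int) (hne : pending ≠ [])
    (hkeys : ∀ nt ∈ pending, (PySem.Dict.ofList cfg).contains nt = true)
    (hcov : ∀ p ∈ cfg, p.1 ∈ pending ∨ c.contains p.1 = true) :
    ∃ nt ∈ pending, pvReadyB cfg c nt = true := by
  obtain ⟨nt, hnt, hmin⟩ := pv_exists_min pending (pvRank cfg) hne
  refine ⟨nt, hnt, ?_⟩
  obtain ⟨prods, hprods⟩ : ∃ prods, (PySem.Dict.ofList cfg).get? nt = some prods := by
    have := hkeys nt hnt
    rw [PySem.Dict.contains_eq_isSome_get?] at this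
    exact Option.isSome_iff_exists.mp this
  rw [pvReadyB, pv_getD_of_get?_some cfg nt prods hprods, List.all_eq_true]
  intro production hp
  rw [List.all_eq_true]
  intro sym hs
  by_cases hk : (PySem.Dict.ofList cfg).contains sym = true
  · have hch := pv_child_mem cfg nt prods production sym hprods hp hs hk
    have hlt := pv_rank_lt cfg hpre nt sym hch
    have hnot : sym ∉ pending := fun hmem => absurd (hmin sym hmem) (by omega)
    obtain ⟨p, hpc, hps⟩ := List.mem_map.mp ((pv_contains_iff cfg sym).mp hk)
    rcases hcov p hpc with hin | hc
    · exact absurd (hps ▸ hin) hnot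
    · simp [hps ▸ hc]
  · have hfalse : (PySem.Dict.ofList cfg).contains sym = false := by
      revert hk; cases (PySem.Dict.ofList cfg).contains sym <;> simp
    exact Bool.or_eq_true .. |>.mpr (Or.inr (by rw [hfalse]; rfl))

lemma pv_loopB_main (cfg : List (String × List (List String)))
    (hpre : Pre_count_per_production_py cfg) :
    ∀ (fuel : Nat) (pending : List String) (c : PySem.Dict String Int), pvGood cfg c →
      (∀ nt ∈ pending, (PySem.Dict.ofList cfg).contains nt = true) →
      (∀ p ∈ cfg, p.1 ∈ pending ∨ c.contains p.1 = true) →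
      pending.length < fuel →
      pvGood cfg (pvLoopB cfg fuel c pending) ∧
      (∀ p ∈ cfg, (pvLoopB cfg fuel c pending).contains p.1 = true) := by
  intro fuel
  induction fuel with
  | zero => intro pending c _ _ _ h; omega
  | succ f ih =>
    intro pending c hG hkeys hcov hlen
    cases pending with
    | nil =>
      rw [pvLoopB]
      exact ⟨hG, fun p hp => (hcov p hp).resolve_left (by simp)⟩
    | cons nt rest =>
      rw [pvLoopB]
      case x_3 => simp
      obtain ⟨r1, r2, r3, r4, r5, r6, _⟩ := pv_roundB cfg hpre (nt :: rest) c [] hG hkeys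
      simp only [List.foldl_cons, List.nil_append] at r1 r2 r3 r4 r5 r6
      have hprog := pv_progress cfg hpre (nt :: rest) c (by simp) hkeys hcov
      have hlt := r6 hprog
      simp only [List.length_nil] at hlt
      simp only [List.foldl_cons, List.nil_append]
      rw [if_neg (by simp only [List.length_cons] at hlt ⊢; omega)]
      simp only [List.length_cons] at hlt hlen
      refine ih _ _ r1 ?_ ?_ (by omega)
      · intro nt' h'
        rcases r3 nt' h' with h | h
        · exact absurd h (by simp)
        · exact hkeys nt' h
      · intro p hp
        rcases hcov p hp with hin | hc
        · exact (r4 p.1 hin).symm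
        · exact Or.inr (r2 p.1 hc)

-- ----- assembling both ports into the same canonical value -----

lemma pv_empty_good (cfg : List (String × List (List String))) :
    pvGood cfg PySem.Dict.empty := by
  intro k v h
  rw [PySem.Dict.get?_empty] at h
  exact absurd h (by simp)

lemma pv_portA_canon (cfg : List (String × List (List String)))
    (hpre : Pre_count_per_production_py cfg) :
    count_per_production_py cfg
      = (cfg.foldl (fun d p => d.insert p.1 (p.2.map (fun production =>
          (production.map (pvCval cfg)).prod))) PySem.Dict.empty).items := by
  rw [count_per_production_py]
  obtain ⟨g1, _, g3⟩ := pv_phase1 cfg hpre cfg PySem.Dict.empty (pv_empty_good cfg)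
    (fun q hq => hq)
  have hall := pv_all_getD cfg _ g1 g3
  simp only [hall, pv_prod_foldl]

lemma pv_portB_canon (cfg : List (String × List (List String)))
    (hpre : Pre_count_per_production_py cfg) :
    count_per_production_py_alt cfg
      = (cfg.foldl (fun d p => d.insert p.1 (p.2.map (fun production =>
          (production.map (pvCval cfg)).prod))) PySem.Dict.empty).items := by
  rw [count_per_production_py_alt]
  obtain ⟨g1, g3⟩ := pv_loopB_main cfg hpre (cfg.length + 1) (cfg.map Prod.fst)
    PySem.Dict.empty (pv_empty_good cfg)
    (fun nt h => (pv_contains_iff cfg nt).mpr h)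
    (fun p hp => Or.inl (List.mem_map.mpr ⟨p, hp, rfl⟩))
    (by simp)
  have hall := pv_all_getD cfg _ g1 g3
  have hrc : pvRuleCountB (pvLoopB cfg (cfg.length + 1) PySem.Dict.empty (cfg.map Prod.fst))
      = fun production => (production.map (pvCval cfg)).prod := by
    funext production
    rw [pvRuleCountB]
    rw [PySem.List.foldl_congr_mem production _ (fun pc sym => pc * pvCval cfg sym) 1
      (fun acc sym _ => by rw [hall sym])]
    exact pv_prod_foldl cfg production
  simp only [hrc]


theorem pv_witness_pre :
    Dom_count_per_production_py pvWitness_count_per_production_py ∧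
    Pre_count_per_production_py pvWitness_count_per_production_py := by
  constructor <;> decide

-- ===== VERDICT (by name: the statement is the Claim_ definition above) =====
theorem count_per_production_py_spec : Claim_equal_count_per_production_py := by
  intro cfg _ hpre
  unfold Spec_count_per_production_py
  rw [pv_portA_canon cfg hpre, pv_portB_canon cfg hpre]
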